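-- pv_equiv track=rewrite | github.com/mintiti/pyrat-rust | cli/tests/test_display_symmetry.py | rotate_board_string_180
-- ===== SOURCE A (Python) =====
-- def rotate_board_string_180(board: str, width: int, height: int) -> str:
--     """Rotate a rendered board string 180° around its center.
--
--     This performs a visual rotation, swapping R↔P since players swap
--     positions when the board is rotated.
--
--     Args:
--         board: Multi-line board rendering
--         width: Board width
--         height: Board height
--
--     Returns:
--         Rotated board string with R↔P swapped
--     """
--     lines = board.strip().split("\n")
--
--     # Reverse line order (vertical flip)
--     rotated_lines = list(reversed(lines))
--
--     # Reverse each line (horizontal flip)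
--     rotated_lines = [line[::-1] for line in rotated_lines]
--
--     # Swap R and P (players swap when rotated)
--     result = []
--     for line in rotated_lines:
--         # Replace temporarily to avoid double-swapping
--         line = line.replace("R", "\x00")  # Placeholder
--         line = line.replace("P", "R")
--         line = line.replace("\x00", "P")
--         result.append(line)
--
--     return "\n".join(result)
-- ===== SOURCE B (Python) =====
-- def rotate_board_string_180(board: str, width: int, height: int) -> str:
--     """Rotate a rendered board string 180° and swap R<->P.
--
--     Reverses the whole stripped string at once (reversing a newline-joined
--     string = reversing line order + reversing each line), then swaps R and P
--     in one pass with a translation table."""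
--     s = board.strip()[::-1]
--     return s.translate(str.maketrans("RP", "PR"))
-- ===== Notes on version B (the rewrite author's own statement) =====
-- stated objective: simpler
-- what changed: B replaces split-lines / reverse-list / per-line-reverse / three-replace placeholder dance by one whole-string reversal plus a single translate pass swapping R and P.
import Mathlib
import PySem

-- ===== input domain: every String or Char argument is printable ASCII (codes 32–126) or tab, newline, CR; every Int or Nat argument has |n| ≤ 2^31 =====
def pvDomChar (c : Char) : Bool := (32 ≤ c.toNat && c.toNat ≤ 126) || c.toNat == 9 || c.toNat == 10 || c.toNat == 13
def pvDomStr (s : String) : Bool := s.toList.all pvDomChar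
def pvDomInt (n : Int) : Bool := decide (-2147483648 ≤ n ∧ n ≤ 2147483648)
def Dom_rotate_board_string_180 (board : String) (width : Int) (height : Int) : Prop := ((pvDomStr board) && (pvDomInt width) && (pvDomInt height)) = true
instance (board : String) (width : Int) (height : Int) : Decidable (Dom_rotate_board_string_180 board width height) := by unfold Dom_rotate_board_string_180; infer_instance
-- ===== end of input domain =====

-- B replaces A's split/reverse-lines/reverse-each-line/three-replace pipeline by one
-- whole-string reversal plus a single character-translation pass (objective: simpler).

-- ===== PORT A =====
-- lines = board.strip().split("\n"); reverse line order; reverse each line;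
-- then per line: replace R->NUL, P->R, NUL->P; join with "\n".
def rotate_board_string_180 (board : String) (width : Int) (height : Int) : String :=
  let lines := PySem.Chars.splitOn (PySem.Chars.strip board.toList) ['\n']
  let rotated_lines := lines.reverse
  let rotated_lines2 := rotated_lines.map
    (fun line => (PySem.Chars.slice? line none none (-1)).getD [])  -- line[::-1]
  let result := rotated_lines2.map (fun line =>
    let line1 := PySem.Chars.replace line ['R'] ['\x00']
    let line2 := PySem.Chars.replace line1 ['P'] ['R']
    PySem.Chars.replace line2 ['\x00'] ['P'])
  String.mk (PySem.Chars.join ['\n'] result)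

-- ===== PORT B =====
-- str.maketrans("RP","PR") as a character map
def pvSwapRP (c : Char) : Char := if c = 'R' then 'P' else if c = 'P' then 'R' else c

def rotate_board_string_180_alt (board : String) (width : Int) (height : Int) : String :=
  let s := (PySem.Chars.slice? (PySem.Chars.strip board.toList) none none (-1)).getD []  -- board.strip()[::-1]
  String.mk (s.map pvSwapRP)  -- s.translate(str.maketrans("RP", "PR"))

-- ===== PRECONDITION & SPEC =====
def Spec_rotate_board_string_180 (board : String) (width : Int) (height : Int) (out : String) : Prop := out = rotate_board_string_180_alt board width height
instance (board : String) (width : Int) (height : Int) (out : String) : Decidable (Spec_rotate_board_string_180 board width height out) := by unfold Spec_rotate_board_string_180; infer_instance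

-- ===== CLAIM (what is proved, stated in full; the proofs are below) =====
def Claim_equal_rotate_board_string_180 : Prop := ∀ (board : String) (width : Int) (height : Int), Dom_rotate_board_string_180 board width height → Spec_rotate_board_string_180 board width height (rotate_board_string_180 board width height)

-- ===== LEMMAS AND PROOFS =====

-- single-character replace is a pointwise map
theorem replace_go_single (a b : Char) : ∀ (fuel : Nat) (l acc : List Char),
    l.length ≤ fuel →
    PySem.Chars.replace.go [a] [b] fuel l acc
      = acc.reverse ++ l.map (fun c => if c = a then b else c) := by
  intro fuel
  induction fuel with
  | zero =>
    intro l acc h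
    have : l = [] := List.eq_nil_of_length_eq_zero (Nat.le_zero.mp h)
    subst this
    rw [PySem.Chars.replace.go.eq_def]
    simp
  | succ n ih =>
    intro l acc h
    cases l with
    | nil => rw [PySem.Chars.replace.go.eq_def]; simp
    | cons c t =>
      rw [PySem.Chars.replace.go.eq_def]
      simp only [List.isPrefixOf, List.map_cons]
      by_cases hc : c = a
      · simp only [hc, beq_self_eq_true, Bool.true_and, List.isPrefixOf_nil_left, if_true,
          List.length_cons, List.length_nil, List.drop_succ_cons, List.drop_zero]
        rw [ih t _ (by simpa using h)]
        simp
      · have hbeq : (a == c) = false := beq_eq_false_iff_ne.mpr (fun h' => hc h'.symm)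
        simp only [hbeq, Bool.false_and, Bool.false_eq_true, if_false]
        rw [ih t _ (by simpa using h)]
        simp [hc]

theorem replace_single (a b : Char) (l : List Char) :
    PySem.Chars.replace l [a] [b] = l.map (fun c => if c = a then b else c) := by
  unfold PySem.Chars.replace
  rw [if_neg (by simp), replace_go_single a b l.length l [] (le_refl _)]
  simp

-- the three-replace placeholder dance equals the R<->P swap on NUL-free lines
theorem replace_chain_eq_swap (l : List Char) (h : '\x00' ∉ l) :
    PySem.Chars.replace (PySem.Chars.replace (PySem.Chars.replace l ['R'] ['\x00']) ['P'] ['R']) ['\x00'] ['P']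
      = l.map pvSwapRP := by
  rw [replace_single, replace_single, replace_single, List.map_map, List.map_map]
  apply List.map_congr_left
  intro c hc
  have hne : c ≠ '\x00' := fun h' => h (h' ▸ hc)
  simp only [Function.comp_apply, pvSwapRP]
  by_cases h1 : c = 'R' <;> by_cases h2 : c = 'P' <;> simp [h1, h2, hne] <;> decide

-- a simple structural model of split("\n")
def splitNl : List Char → List (List Char)
  | [] => [[]]
  | c :: t =>
    if c = '\n' then [] :: splitNl t
    else
      match splitNl t with
      | [] => [[c]]
      | p :: ps => (c :: p) :: ps

theorem splitNl_ne_nil (s : List Char) : splitNl s ≠ [] := by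
  cases s with
  | nil => simp [splitNl]
  | cons c t =>
    simp only [splitNl]
    split
    · simp
    · cases h : splitNl t <;> simp

theorem splitOn_go_nl : ∀ (fuel : Nat) (l cur : List Char) (acc : List (List Char)),
    l.length ≤ fuel →
    PySem.Chars.splitOn.go ['\n'] fuel l cur acc
      = acc.reverse ++ ((cur.reverse ++ (splitNl l).headI) :: (splitNl l).tail) := by
  intro fuel
  induction fuel with
  | zero =>
    intro l cur acc h
    have : l = [] := List.eq_nil_of_length_eq_zero (Nat.le_zero.mp h)
    subst this
    rw [PySem.Chars.splitOn.go.eq_def]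
    simp [splitNl]
  | succ n ih =>
    intro l cur acc h
    cases l with
    | nil => rw [PySem.Chars.splitOn.go.eq_def]; simp [splitNl]
    | cons c t =>
      rw [PySem.Chars.splitOn.go.eq_def]
      simp only [List.isPrefixOf, List.isPrefixOf_nil_left, Bool.and_true]
      by_cases hc : c = '\n'
      · simp only [hc, beq_self_eq_true, if_true, List.length_cons, List.length_nil,
          List.drop_succ_cons, List.drop_zero]
        rw [ih t [] _ (by simpa using h)]
        have hne := splitNl_ne_nil t
        cases ht : splitNl t with
        | nil => exact absurd ht hne
        | cons p ps => simp [splitNl, ht]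
      · have hbeq : ('\n' == c) = false := beq_eq_false_iff_ne.mpr (fun h' => hc h'.symm)
        simp only [hbeq, Bool.false_and, Bool.false_eq_true, if_false]
        rw [ih t (c :: cur) acc (by simpa using h)]
        have hne := splitNl_ne_nil t
        cases ht : splitNl t with
        | nil => exact absurd ht hne
        | cons p ps => simp [splitNl, hc, ht]

theorem splitOn_nl (s : List Char) : PySem.Chars.splitOn s ['\n'] = splitNl s := by
  unfold PySem.Chars.splitOn
  rw [splitOn_go_nl (s.length + 1) s [] [] (Nat.le_succ _)]
  have hne := splitNl_ne_nil s
  cases h : splitNl s with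
  | nil => exact absurd h hne
  | cons p ps => simp

-- every character of a piece of splitNl comes from the string
theorem mem_splitNl (s : List Char) : ∀ p ∈ splitNl s, ∀ c ∈ p, c ∈ s := by
  induction s with
  | nil => intro p hp c hc; simp [splitNl] at hp; simp [hp] at hc
  | cons a t ih =>
    intro p hp c hc
    simp only [splitNl] at hp
    by_cases ha : a = '\n'
    · simp only [ha, if_true, List.mem_cons] at hp
      rcases hp with h | h
      · simp [h] at hc
      · exact List.mem_cons_of_mem _ (ih p h c hc)
    · simp only [ha, if_false] at hp
      cases ht : splitNl t with
      | nil => exact absurd ht (splitNl_ne_nil t)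
      | cons q qs =>
        rw [ht] at hp
        rcases List.mem_cons.mp hp with h | h
        · subst h
          rcases List.mem_cons.mp hc with h | h
          · simp [h]
          · exact List.mem_cons_of_mem _ (ih q (by simp [ht]) c h)
        · exact List.mem_cons_of_mem _ (ih p (by simp [ht, h]) c hc)

-- join lemmas
theorem join_last_append (sep : List Char) : ∀ (xs : List (List Char)) (y z : List Char),
    PySem.Chars.join sep (xs ++ [y ++ z]) = PySem.Chars.join sep (xs ++ [y]) ++ z := by
  intro xs
  induction xs with
  | nil => intro y z; simp [PySem.Chars.join_singleton]
  | cons a xs ih =>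
    intro y z
    cases xs with
    | nil =>
      simp only [List.nil_append, List.cons_append]
      rw [PySem.Chars.join_cons_cons, PySem.Chars.join_cons_cons,
        PySem.Chars.join_singleton, PySem.Chars.join_singleton]
      simp [List.append_assoc]
    | cons b xs' =>
      simp only [List.cons_append]
      rw [PySem.Chars.join_cons_cons, PySem.Chars.join_cons_cons]
      have := ih y z
      simp only [List.cons_append] at this
      rw [this]
      simp [List.append_assoc]

theorem join_empty_last (sep : List Char) : ∀ (xs : List (List Char)), xs ≠ [] →
    PySem.Chars.join sep (xs ++ [[]]) = PySem.Chars.join sep xs ++ sep := by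
  intro xs
  induction xs with
  | nil => intro h; exact absurd rfl h
  | cons a xs ih =>
    intro _
    cases xs with
    | nil =>
      simp only [List.nil_append, List.cons_append]
      rw [PySem.Chars.join_cons_cons, PySem.Chars.join_singleton, PySem.Chars.join_singleton]
      simp
    | cons b xs' =>
      simp only [List.cons_append]
      rw [PySem.Chars.join_cons_cons, PySem.Chars.join_cons_cons, ← List.cons_append,
        ih (by simp)]
      simp [List.append_assoc]

-- the core identity: reverse lines + reverse each line + swap, joined = swap of whole reverse
theorem core (s : List Char) :
    PySem.Chars.join ['\n'] ((splitNl s).reverse.map (fun l => l.reverse.map pvSwapRP))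
      = s.reverse.map pvSwapRP := by
  induction s with
  | nil => simp [splitNl, PySem.Chars.join_singleton]
  | cons c t ih =>
    simp only [splitNl]
    by_cases hc : c = '\n'
    · simp only [hc, if_true, List.reverse_cons, List.map_append, List.map_cons, List.map_nil,
        List.reverse_nil]
      rw [join_empty_last _ _ (by simp [splitNl_ne_nil t]), ih]
      simp [pvSwapRP]
    · simp only [hc, if_false]
      cases ht : splitNl t with
      | nil => exact absurd ht (splitNl_ne_nil t)
      | cons p ps =>
        simp only [List.reverse_cons, List.map_append, List.map_cons, List.map_nil,
          List.reverse_cons, List.map_append]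
        rw [join_last_append]
        have ih' := ih
        rw [ht] at ih'
        simp only [List.reverse_cons, List.map_append, List.map_cons, List.map_nil] at ih'
        rw [ih']

-- ===== VERDICT (by name: the statement is the Claim_ definition above) =====
theorem rotate_board_string_180_spec : Claim_equal_rotate_board_string_180 := by
  intro board width height hdom
  unfold Spec_rotate_board_string_180 rotate_board_string_180 rotate_board_string_180_alt
  simp only [PySem.List.slice?_none_none_neg_one, PySem.Chars.slice?_eq_listSlice?, Option.getD_some]
  set s := PySem.Chars.strip board.toList with hs
  -- no NUL anywhere in the stripped board
  have hnul : ∀ c ∈ s, c ≠ '\x00' := by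
    intro c hc
    have hsub : List.Sublist s board.toList := by
      rw [hs]
      unfold PySem.Chars.strip PySem.Chars.rstrip PySem.Chars.lstrip
      have h1 : List.Sublist (List.dropWhile PySem.Chars.isspace
          (List.dropWhile PySem.Chars.isspace board.toList).reverse).reverse
          (List.dropWhile PySem.Chars.isspace board.toList).reverse.reverse :=
        (List.dropWhile_sublist _).reverse
      rw [List.reverse_reverse] at h1
      exact h1.trans (List.dropWhile_sublist _)
    have hmem : c ∈ board.toList := hsub.subset hc
    have hdc : pvDomChar c = true := by
      unfold Dom_rotate_board_string_180 at hdom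
      simp only [Bool.and_eq_true] at hdom
      exact List.all_eq_true.mp hdom.1.1 c hmem
    intro hnil
    subst hnil
    simp [pvDomChar] at hdc
  rw [splitOn_nl]
  have hlines : ((splitNl s).reverse.map (fun line => line.reverse)).map (fun line =>
      PySem.Chars.replace (PySem.Chars.replace (PySem.Chars.replace line ['R'] ['\x00']) ['P'] ['R']) ['\x00'] ['P'])
      = (splitNl s).reverse.map (fun l => l.reverse.map pvSwapRP) := by
    rw [List.map_map]
    apply List.map_congr_left
    intro l hl
    simp only [Function.comp_apply]
    apply replace_chain_eq_swap
    intro h0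
    exact hnul _ (mem_splitNl s l (List.mem_reverse.mp hl) _ (List.mem_reverse.mp h0)) rfl
  rw [hlines, core]
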